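-- pv_equiv track=rewrite | github.com/younjunseon/baekjoon-programmers | 프로그래머스/0/181908. 접미사인지 확인하기/접미사인지 확인하기.py | solution
-- ===== SOURCE A (Python) =====
-- def solution(my_string, is_suffix):
--     answer = 0
--     n = len(my_string)-len(is_suffix)
--     for i in range(len(is_suffix)):
--         if(len(my_string) < len(is_suffix)):
--             return 0
--         if(my_string[n] != is_suffix[i]):
--             return 0
--         n += 1
--
--     return 1
-- ===== SOURCE B (Python) =====
-- def solution(my_string, is_suffix):
--     tail = my_string[len(my_string) - len(is_suffix):]
--     return int(tail == is_suffix)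
-- ===== Notes on version B (the rewrite author's own statement) =====
-- stated objective: simpler
-- what changed: Replaces the index loop with its per-iteration length guard by one tail slice and a single string equality, returning int(tail == is_suffix).
import Mathlib
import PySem

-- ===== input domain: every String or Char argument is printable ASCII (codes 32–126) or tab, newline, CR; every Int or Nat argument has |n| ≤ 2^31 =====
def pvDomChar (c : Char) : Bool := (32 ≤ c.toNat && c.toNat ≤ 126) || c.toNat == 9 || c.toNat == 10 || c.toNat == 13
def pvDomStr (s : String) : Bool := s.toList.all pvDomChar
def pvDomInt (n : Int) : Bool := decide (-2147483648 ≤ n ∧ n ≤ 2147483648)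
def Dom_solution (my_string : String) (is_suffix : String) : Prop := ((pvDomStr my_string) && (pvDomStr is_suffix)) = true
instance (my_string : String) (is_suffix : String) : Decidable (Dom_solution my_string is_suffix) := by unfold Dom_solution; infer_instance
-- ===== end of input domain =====

-- B replaces A's per-character index loop (with its in-loop length guard) by a single
-- tail slice compared for equality: simpler, same behaviour, same O(n) cost.

-- ===== PORT A =====
-- the for-loop of A: remaining indices i, current pointer n; early returns become results
def solutionLoop (ms suf : List Char) : List Int → Int → Int
  | [], _ => 1
  | i :: rest, n =>
    if ms.length < suf.length then 0
    else
      match PySem.List.pyGet? ms n, PySem.List.pyGet? suf i with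
      | some a, some b => if a ≠ b then 0 else solutionLoop ms suf rest (n + 1)
      | _, _ => 0   -- unreachable: the guard keeps both indices in range on every reached iteration

def solution (my_string : String) (is_suffix : String) : Int :=
  let ms := my_string.toList
  let suf := is_suffix.toList
  solutionLoop ms suf (PySem.List.pyRange 0 (suf.length : Int) 1)
    ((ms.length : Int) - (suf.length : Int))

-- ===== PORT B =====
def solution_alt (my_string : String) (is_suffix : String) : Int :=
  let ms := my_string.toList
  let tail := PySem.List.slice ms (some ((ms.length : Int) - (is_suffix.toList.length : Int))) none
  if tail = is_suffix.toList then 1 else 0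

-- ===== PRECONDITION & SPEC =====
def Spec_solution (my_string : String) (is_suffix : String) (out : Int) : Prop := out = solution_alt my_string is_suffix
instance (my_string : String) (is_suffix : String) (out : Int) : Decidable (Spec_solution my_string is_suffix out) := by unfold Spec_solution; infer_instance

-- ===== CLAIM (what is proved, stated in full; the proofs are below) =====
def Claim_equal_solution : Prop := ∀ (my_string : String) (is_suffix : String), Dom_solution my_string is_suffix → Spec_solution my_string is_suffix (solution my_string is_suffix)

-- ===== LEMMAS AND PROOFS =====

-- the loop, from index k on, decides equality of the drops
theorem solutionLoop_eq (ms suf : List Char) (hlen : suf.length ≤ ms.length) :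
    ∀ (d k : Nat), k ≤ suf.length → suf.length - k = d →
      solutionLoop ms suf (PySem.List.pyRange (k : Int) (suf.length : Int) 1)
        ((ms.length - suf.length + k : Nat) : Int) =
      if ms.drop (ms.length - suf.length + k) = suf.drop k then 1 else 0 := by
  intro d
  induction d with
  | zero =>
    intro k hk hd
    have hk' : k = suf.length := by omega
    subst hk'
    rw [PySem.List.pyRange_one_eq_nil (by omega)]
    have h1 : ms.length - suf.length + suf.length = ms.length := by omega
    simp [solutionLoop, h1]
  | succ d ih =>
    intro k hk hd
    have hklt : k < suf.length := by omega
    have hidx : ms.length - suf.length + k < ms.length := by omega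
    rw [PySem.List.pyRange_one_cons (by exact_mod_cast hklt)]
    show solutionLoop ms suf _ _ = _
    rw [solutionLoop]
    rw [if_neg (by omega)]
    rw [PySem.List.pyGet?_natCast, PySem.List.pyGet?_natCast,
        List.getElem?_eq_getElem hidx, List.getElem?_eq_getElem hklt]
    dsimp only
    have hms : ms.drop (ms.length - suf.length + k)
        = ms[ms.length - suf.length + k] :: ms.drop (ms.length - suf.length + k + 1) :=
      List.drop_eq_getElem_cons hidx
    have hsuf : suf.drop k = suf[k] :: suf.drop (k + 1) := List.drop_eq_getElem_cons hklt
    by_cases hne : ms[ms.length - suf.length + k] = suf[k]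
    · rw [if_neg (by simp [hne])]
      have hcast : ((ms.length - suf.length + k : Nat) : Int) + 1
          = ((ms.length - suf.length + (k + 1) : Nat) : Int) := by push_cast; ring
      have hcast2 : ((k : Int) + 1) = ((k + 1 : Nat) : Int) := by push_cast; ring
      rw [hcast, hcast2, ih (k + 1) (by omega) (by omega)]
      have hassoc : ms.length - suf.length + k + 1 = ms.length - suf.length + (k + 1) :=
        Nat.add_assoc _ _ _
      rw [hms, hsuf, hne, hassoc]
      by_cases ht : ms.drop (ms.length - suf.length + (k + 1)) = suf.drop (k + 1)
      · rw [if_pos ht, if_pos (by rw [ht])]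
      · rw [if_neg ht, if_neg (fun h => ht (List.cons_eq_cons.mp h).2)]
    · rw [if_pos (by simp [hne])]
      rw [if_neg (fun h => hne (by rw [hms, hsuf] at h; exact (List.cons_eq_cons.mp h).1))]

theorem solution_core (ms suf : List Char) :
    solutionLoop ms suf (PySem.List.pyRange 0 (suf.length : Int) 1)
        ((ms.length : Int) - (suf.length : Int)) =
      if PySem.List.slice ms (some ((ms.length : Int) - (suf.length : Int))) none = suf then 1
      else 0 := by
  by_cases hlen : suf.length ≤ ms.length
  · -- nonnegative start: the slice is a plain drop, the loop decides drop-equality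
    have hc : ((ms.length : Int) - (suf.length : Int)) = ((ms.length - suf.length : Nat) : Int) := by
      push_cast [Nat.cast_sub hlen]; ring
    rw [hc, PySem.List.slice_from_natCast]
    have := solutionLoop_eq ms suf hlen (suf.length - 0) 0 (by omega) rfl
    simpa using this
  · -- my_string shorter: the loop's guard fires on iteration one; the slice is too short to equal suf
    have hne : suf ≠ [] := by intro h; simp [h] at hlen
    have h0 : (0 : Int) < (suf.length : Int) := by
      have : 0 < suf.length := List.length_pos_iff.mpr hne
      exact_mod_cast this
    rw [PySem.List.pyRange_one_cons h0]
    rw [solutionLoop, if_pos (by omega)]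
    rw [PySem.List.slice_some_none]
    have hlt : (ms.drop (PySem.List.clampIdx ms.length ((ms.length : Int) - (suf.length : Int)))).length < suf.length := by
      rw [List.length_drop]; omega
    rw [if_neg (by intro h; rw [h] at hlt; omega)]

-- ===== VERDICT (by name: the statement is the Claim_ definition above) =====
theorem solution_spec : Claim_equal_solution := by
  intro my_string is_suffix _
  unfold Spec_solution
  exact solution_core my_string.toList is_suffix.toList
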